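-- pv_equiv track=rewrite | github.com/vishal7090/md-generator | tools/skillgen/pyproject_util.py | scripts_by_area
-- ===== SOURCE A (Python) =====
-- def area_for_script_target(target: str) -> str | None:
--     """Map 'md_generator.pdf.converter:main' -> 'pdf'; 'md_generator.media.audio.api.run:main' -> 'media'."""
--     if not target.startswith("md_generator."):
--         return None
--     rest = target[len("md_generator.") :]
--     return rest.split(".", 1)[0] if rest else None
--
-- def scripts_by_area(scripts: dict[str, str]) -> dict[str, list[str]]:
--     out: dict[str, list[str]] = {}
--     for name, target in scripts.items():
--         area = area_for_script_target(target)
--         if area is None: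
--             continue
--         out.setdefault(area, []).append(name)
--     for k in out:
--         out[k] = sorted(set(out[k]))
--     return out
-- ===== SOURCE B (Python) =====
-- def area_for_script_target(target: str) -> str | None:
--     if not target.startswith("md_generator."):
--         return None
--     rest = target[len("md_generator.") :]
--     return rest.split(".", 1)[0] if rest else None
--
-- def scripts_by_area(scripts: dict[str, str]) -> dict[str, list[str]]:
--     pairs = [(area_for_script_target(t), n) for n, t in scripts.items()]
--     areas = dict.fromkeys(a for a, _ in pairs if a is not None)
--     return {a: sorted({n for a2, n in pairs if a2 == a}) for a in areas}
-- ===== Notes on version B (the rewrite author's own statement) =====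
-- stated objective: alternative
-- what changed: B replaces A's incremental setdefault/append dict-building loop plus a second per-key sorted(set(...)) rewrite pass by a declarative pipeline: compute (area, name) pairs once, take the deduped area list via dict.fromkeys, and build each group directly as sorted({names with that area}) in one dict comprehension.
import Mathlib
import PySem

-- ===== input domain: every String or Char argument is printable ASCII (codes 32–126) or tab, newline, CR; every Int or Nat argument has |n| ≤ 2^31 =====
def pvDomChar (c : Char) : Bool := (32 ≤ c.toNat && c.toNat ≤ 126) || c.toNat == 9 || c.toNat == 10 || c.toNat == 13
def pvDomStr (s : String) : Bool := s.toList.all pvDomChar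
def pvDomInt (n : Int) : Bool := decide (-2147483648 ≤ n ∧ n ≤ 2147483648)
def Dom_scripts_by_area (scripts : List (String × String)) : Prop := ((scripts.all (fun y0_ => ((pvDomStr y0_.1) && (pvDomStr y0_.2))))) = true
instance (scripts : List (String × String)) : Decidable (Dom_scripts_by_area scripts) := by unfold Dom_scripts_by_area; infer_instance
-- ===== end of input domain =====

-- B builds the grouping as a declarative pipeline (pairs, deduped area list, one comprehension)
-- instead of A's incremental dict loop with a second per-key sorted(set(..)) rewrite pass; same cost class.

-- shared module helper: area_for_script_target (used by both A and B, as in the Python module)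
def area_for_script_target (target : String) : Option String :=
  if !(PySem.Str.startswith target "md_generator.") then none
  else
    let rest := PySem.Str.slice target (some 13) none
    if PySem.Str.len rest ≠ 0 then
      match PySem.Str.splitMax? rest "." 1 with
      | some (h :: _) => some h
      | _ => none        -- unreachable: splitMax? with sep ≠ "" returns a nonempty list
    else none

-- ===== PORT A =====
def scripts_by_area (scripts : List (String × String)) : List (String × List String) :=
  let out : PySem.Dict String (List String) :=
    scripts.foldl (fun d p =>
      match area_for_script_target p.2 with
      | none => d
      | some area => d.modify area [] (· ++ [p.1])) PySem.Dict.empty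
  out.items.map (fun kv => (kv.1, PySem.List.sorted (PySem.Set.ofList kv.2) (fun x => x) false))

-- ===== PORT B =====
def scripts_by_area_alt (scripts : List (String × String)) : List (String × List String) :=
  let pairs : List (Option String × String) := scripts.map (fun p => (area_for_script_target p.2, p.1))
  let areas : List String := PySem.List.dedup (pairs.filterMap (fun q => q.1))
  areas.map (fun a =>
    (a, PySem.List.sorted
          (PySem.Set.ofList ((pairs.filter (fun q => q.1 == some a)).map (fun q => q.2)))
          (fun x => x) false))

-- ===== PRECONDITION & SPEC =====
def Spec_scripts_by_area (scripts : List (String × String)) (out : List (String × List String)) : Prop := out = scripts_by_area_alt scripts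
instance (scripts : List (String × String)) (out : List (String × List String)) : Decidable (Spec_scripts_by_area scripts out) := by unfold Spec_scripts_by_area; infer_instance

-- ===== CLAIM (what is proved, stated in full; the proofs are below) =====
def Claim_equal_scripts_by_area : Prop := ∀ (scripts : List (String × String)), Dom_scripts_by_area scripts → Spec_scripts_by_area scripts (scripts_by_area scripts)

-- ===== LEMMAS AND PROOFS =====

-- the grouped (area, name) pairs both sides traverse
def pvKeyed (scripts : List (String × String)) : List (String × String) :=
  scripts.filterMap (fun p => (area_for_script_target p.2).map (fun a => (a, p.1)))

lemma fold_eq_keyed (scripts : List (String × String)) (d : PySem.Dict String (List String)) :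
    scripts.foldl (fun d p =>
      match area_for_script_target p.2 with
      | none => d
      | some area => d.modify area [] (· ++ [p.1])) d
    = (pvKeyed scripts).foldl (fun d q => d.modify q.1 [] (· ++ [q.2])) d := by
  induction scripts generalizing d with
  | nil => rfl
  | cons p t ih =>
      simp only [pvKeyed, List.filterMap_cons]
      cases h : area_for_script_target p.2 with
      | none => simp [List.foldl_cons, h, ih, pvKeyed]
      | some a => simp [List.foldl_cons, h, ih, pvKeyed]

lemma filterMap_fst (scripts : List (String × String)) :
    (scripts.map (fun p => (area_for_script_target p.2, p.1))).filterMap (fun q => q.1)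
    = (pvKeyed scripts).map (fun q => q.1) := by
  induction scripts with
  | nil => rfl
  | cons p t ih =>
      simp only [pvKeyed, List.map_cons, List.filterMap_cons] at *
      cases area_for_script_target p.2 <;> simp [ih]

lemma filter_snd (scripts : List (String × String)) (a : String) :
    ((scripts.map (fun p => (area_for_script_target p.2, p.1))).filter (fun q => q.1 == some a)).map (fun q => q.2)
    = ((pvKeyed scripts).filter (fun q => q.1 == a)).map (fun q => q.2) := by
  induction scripts with
  | nil => rfl
  | cons p t ih =>
      simp only [pvKeyed, List.map_cons, List.filterMap_cons] at *
      cases area_for_script_target p.2 with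
      | none => simp [ih]
      | some b =>
          by_cases hb : b = a <;> simp [hb, ih]

lemma items_eq_keys_map (d : PySem.Dict String (List String)) (h : d.keys.Nodup) :
    d.items = d.keys.map (fun k => (k, d.getD k [])) := by
  have : ∀ p ∈ d.items, (p.1, d.getD p.1 []) = p := by
    intro p hp
    have := PySem.Dict.getD_of_mem_items (d := d) (k := p.1) (v := p.2) (by simpa using hp) h (d0 := [])
    simp [this]
  calc d.items = d.items.map id := by simp
    _ = d.items.map (fun p => (p.1, d.getD p.1 [])) := (List.map_congr_left (fun p hp => ((this p hp).symm : (id p) = _))).symm ▸ rfl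
    _ = d.keys.map (fun k => (k, d.getD k [])) := by
        simp only [PySem.Dict.keys, List.map_map]; rfl

-- ===== VERDICT (by name: the statement is the Claim_ definition above) =====
theorem scripts_by_area_spec : Claim_equal_scripts_by_area := by
  intro scripts _
  unfold Spec_scripts_by_area scripts_by_area scripts_by_area_alt
  simp only [fold_eq_keyed, filterMap_fst]
  set L := pvKeyed scripts with hL
  set d := L.foldl (fun d q => d.modify q.1 [] (· ++ [q.2])) PySem.Dict.empty with hd
  have hkeys : d.keys = PySem.Set.ofList (L.map (fun q => q.1)) := by
    simpa using PySem.Dict.keys_foldl_modify_key (l := L) (key := fun q => q.1)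
      (d0 := []) (f := fun d q => (· ++ [q.2])) (d := PySem.Dict.empty)
  have hnodup : d.keys.Nodup := by
    rw [hkeys]; exact PySem.Set.nodup_ofList _
  have hgetD : ∀ a, d.getD a [] = (L.filter (fun q => q.1 == a)).map (fun q => q.2) := by
    intro a
    simpa using PySem.Dict.getD_foldl_modify_append (l := L) (d := PySem.Dict.empty) (c := a)
  rw [items_eq_keys_map d hnodup, hkeys, List.map_map]
  refine List.map_congr_left ?_
  intro a _
  simp only [Function.comp_apply, hgetD a, hL, filter_snd]
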